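-- pv_equiv track=rewrite | github.com/conceptgrader/issta2023 | src/concept_graph/concept_graph.py | replace_vari_in_concept
-- ===== SOURCE A (Python) =====
-- def replace_vari_in_concept(key, val, stmt):
--     concepts = stmt.split('\n')
--     new_concepts = []
--     for concept in concepts:
--         ss = concept.split(' ')
--         ss = [val if key == s else s for s in ss]
--         new_concept = ' '.join(ss)
--         new_concepts.append(new_concept)
--     new_stmt = '\n'.join(new_concepts)
--     return new_stmt
-- ===== SOURCE B (Python) =====
-- def replace_vari_in_concept(key, val, stmt):
--     # Single pass over the characters: cut tokens at ' ' / '\n' delimiters,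
--     # replacing each whole token equal to key by val, keeping delimiters as-is.
--     out = []
--     tok = []
--     for ch in stmt:
--         if ch == ' ' or ch == '\n':
--             t = ''.join(tok)
--             out.append(val if t == key else t)
--             out.append(ch)
--             tok = []
--         else:
--             tok.append(ch)
--     t = ''.join(tok)
--     out.append(val if t == key else t)
--     return ''.join(out)
-- ===== Notes on version B (the rewrite author's own statement) =====
-- stated objective: alternative
-- what changed: Replaces the nested split('\n')/split(' ')/join structure by a single character-level pass that cuts tokens at ' '/'\n' delimiters, substitutes each token equal to key, and emits delimiters unchanged.
import Mathlib
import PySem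

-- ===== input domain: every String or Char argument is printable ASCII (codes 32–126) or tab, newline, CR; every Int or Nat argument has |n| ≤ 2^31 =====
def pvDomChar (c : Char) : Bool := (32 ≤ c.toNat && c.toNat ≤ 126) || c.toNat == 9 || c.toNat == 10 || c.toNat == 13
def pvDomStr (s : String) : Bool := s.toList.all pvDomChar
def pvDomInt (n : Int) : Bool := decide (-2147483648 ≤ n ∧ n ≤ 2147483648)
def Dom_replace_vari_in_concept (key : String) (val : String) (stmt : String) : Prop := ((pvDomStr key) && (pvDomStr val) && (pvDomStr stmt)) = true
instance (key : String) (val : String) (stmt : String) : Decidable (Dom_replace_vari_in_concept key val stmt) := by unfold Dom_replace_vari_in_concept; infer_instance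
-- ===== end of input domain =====

-- B replaces A's nested split/join passes by one delimiter-preserving character scan (alternative decomposition, same cost).

-- ===== PORT A =====
-- A: split on '\n', per line split on ' ', map tokens, re-join with the same separators.
def replace_vari_in_concept (key : String) (val : String) (stmt : String) : String :=
  let concepts := PySem.Chars.splitOn stmt.toList ['\n']
  let new_concepts := concepts.foldl
    (fun acc concept =>
      let ss := PySem.Chars.splitOn concept [' ']
      let ss' := ss.map (fun s => if key.toList = s then val.toList else s)
      acc ++ [PySem.Chars.join [' '] ss']) []
  String.ofList (PySem.Chars.join ['\n'] new_concepts)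

-- ===== PORT B =====
-- B: one fold over the characters with state (output so far, current token).
def replace_vari_in_concept_alt (key : String) (val : String) (stmt : String) : String :=
  let p := stmt.toList.foldl
    (fun (st : List Char × List Char) ch =>
      if ch = ' ' ∨ ch = '\n' then
        (st.1 ++ (if st.2 = key.toList then val.toList else st.2) ++ [ch], [])
      else (st.1, st.2 ++ [ch])) ([], [])
  String.ofList (p.1 ++ (if p.2 = key.toList then val.toList else p.2))

-- ===== PRECONDITION & SPEC =====
def Spec_replace_vari_in_concept (key : String) (val : String) (stmt : String) (out : String) : Prop := out = replace_vari_in_concept_alt key val stmt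
instance (key : String) (val : String) (stmt : String) (out : String) : Decidable (Spec_replace_vari_in_concept key val stmt out) := by unfold Spec_replace_vari_in_concept; infer_instance

-- ===== CLAIM (what is proved, stated in full; the proofs are below) =====
def Claim_equal_replace_vari_in_concept : Prop := ∀ (key : String) (val : String) (stmt : String), Dom_replace_vari_in_concept key val stmt → Spec_replace_vari_in_concept key val stmt (replace_vari_in_concept key val stmt)

-- ===== LEMMAS AND PROOFS =====

-- token replacement
def pvRepl (key val t : List Char) : List Char := if key = t then val else t

-- structural single-char split: (first token, remaining tokens)
def pvSplitCh (c : Char) : List Char → List Char × List (List Char)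
  | [] => ([], [])
  | a :: rest =>
    let p := pvSplitCh c rest
    if a = c then ([], p.1 :: p.2) else (a :: p.1, p.2)

theorem pvSplitOn_go_spec (c : Char) (fuel : Nat) (l cur : List Char)
    (acc : List (List Char)) (h : l.length ≤ fuel) :
    PySem.Chars.splitOn.go [c] fuel l cur acc =
      acc.reverse ++ (cur.reverse ++ (pvSplitCh c l).1) :: (pvSplitCh c l).2 := by
  induction fuel generalizing l cur acc with
  | zero =>
    have : l = [] := List.length_eq_zero_iff.mp (Nat.le_zero.mp h)
    subst this
    simp [PySem.Chars.splitOn.go, pvSplitCh]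
  | succ n ih =>
    cases l with
    | nil => simp [PySem.Chars.splitOn.go, pvSplitCh]
    | cons a rest =>
      simp only [PySem.Chars.splitOn.go]
      by_cases hac : a = c
      · subst hac
        have hpre : [a].isPrefixOf (a :: rest) = true := by
          simp [List.isPrefixOf]
        simp only [hpre, if_pos]
        rw [ih _ _ _ (by simpa using Nat.le_of_succ_le_succ h)]
        simp [pvSplitCh]
      · have hpre : [c].isPrefixOf (a :: rest) = false := by
          simp [List.isPrefixOf]
          exact fun h => hac h.symm
        simp only [hpre, Bool.false_eq_true, if_false]
        rw [ih _ _ _ (by simpa using Nat.le_of_succ_le_succ h)]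
        simp [pvSplitCh, hac]

theorem pvSplitOn_single (c : Char) (s : List Char) :
    PySem.Chars.splitOn s [c] = (pvSplitCh c s).1 :: (pvSplitCh c s).2 := by
  unfold PySem.Chars.splitOn
  rw [pvSplitOn_go_spec c (s.length + 1) s [] [] (Nat.le_succ _)]
  simp

theorem pvFoldl_append_map {α β : Type} (g : α → β) (l : List α) (acc : List β) :
    l.foldl (fun acc x => acc ++ [g x]) acc = acc ++ l.map g := by
  induction l generalizing acc with
  | nil => simp
  | cons a t ih => simp [List.foldl, ih]

theorem pvJoin_cons (sep a : List Char) (b : List Char) (l : List (List Char)) :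
    PySem.Chars.join sep (a :: b :: l) = a ++ sep ++ PySem.Chars.join sep (b :: l) := by
  simp [PySem.Chars.join, List.intercalate, List.intersperse, List.flatten]

theorem pvJoin_head (sep a b : List Char) (l : List (List Char)) :
    PySem.Chars.join sep ((a ++ b) :: l) = a ++ PySem.Chars.join sep (b :: l) := by
  cases l with
  | nil => simp [PySem.Chars.join, List.intercalate]
  | cons x xs =>
    rw [pvJoin_cons, pvJoin_cons]
    simp

-- A's result on a pending first token `tok` prepended to cs
def pvLine (key val tok line : List Char) : List Char :=
  let p := pvSplitCh ' ' line
  PySem.Chars.join [' '] (pvRepl key val (tok ++ p.1) :: p.2.map (pvRepl key val))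

def pvA (key val tok cs : List Char) : List Char :=
  let p := pvSplitCh '\n' cs
  PySem.Chars.join ['\n'] (pvLine key val tok p.1 :: p.2.map (pvLine key val []))

-- B's recursion with pending token
def pvF (key val : List Char) : List Char → List Char → List Char
  | tok, [] => pvRepl key val tok
  | tok, ch :: rest =>
    if ch = ' ' ∨ ch = '\n' then
      pvRepl key val tok ++ ch :: pvF key val [] rest
    else pvF key val (tok ++ [ch]) rest

theorem pvF_eq_pvA (key val : List Char) (cs tok : List Char) :
    pvF key val tok cs = pvA key val tok cs := by
  induction cs generalizing tok with
  | nil => simp [pvF, pvA, pvLine, pvSplitCh, PySem.Chars.join, List.intercalate]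
  | cons ch rest ih =>
    by_cases hn : ch = '\n'
    · subst hn
      simp only [pvF, Char.reduceEq, or_true, if_true]
      rw [ih]
      simp only [pvA, pvSplitCh]
      norm_num
      rw [pvJoin_cons]
      simp [pvLine, pvSplitCh, PySem.Chars.join, List.intercalate]
    · by_cases hs : ch = ' '
      · subst hs
        simp only [pvF, Char.reduceEq, true_or, if_true]
        rw [ih]
        simp only [pvA, pvLine]
        simp [pvSplitCh]
        rw [pvJoin_cons, pvJoin_head]
        simp
      · simp only [pvF, hs, hn, or_self, if_false]
        rw [ih]
        simp only [pvA, pvSplitCh, hs, hn]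
        norm_num
        simp [pvLine, pvSplitCh, hs, List.append_assoc]

theorem pvB_foldl_spec (key val : List Char) (cs out tok : List Char) :
    (cs.foldl
      (fun (st : List Char × List Char) ch =>
        if ch = ' ' ∨ ch = '\n' then
          (st.1 ++ (if st.2 = key then val else st.2) ++ [ch], [])
        else (st.1, st.2 ++ [ch])) (out, tok)).1 ++
      (if (cs.foldl
      (fun (st : List Char × List Char) ch =>
        if ch = ' ' ∨ ch = '\n' then
          (st.1 ++ (if st.2 = key then val else st.2) ++ [ch], [])
        else (st.1, st.2 ++ [ch])) (out, tok)).2 = key then val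
       else (cs.foldl
      (fun (st : List Char × List Char) ch =>
        if ch = ' ' ∨ ch = '\n' then
          (st.1 ++ (if st.2 = key then val else st.2) ++ [ch], [])
        else (st.1, st.2 ++ [ch])) (out, tok)).2) = out ++ pvF key val tok cs := by
  induction cs generalizing out tok with
  | nil => simp [pvF, pvRepl, eq_comm]
  | cons ch rest ih =>
    by_cases hd : ch = ' ' ∨ ch = '\n'
    · simp only [List.foldl, if_pos hd]
      rw [ih]
      simp only [pvF, if_pos hd, pvRepl, eq_comm]
      simp [List.append_assoc]
    · simp only [List.foldl, if_neg hd]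
      rw [ih]
      simp [pvF, if_neg hd]

-- ===== VERDICT (by name: the statement is the Claim_ definition above) =====
theorem replace_vari_in_concept_spec : Claim_equal_replace_vari_in_concept := by
  intro key val stmt _
  show replace_vari_in_concept key val stmt = replace_vari_in_concept_alt key val stmt
  simp only [replace_vari_in_concept, replace_vari_in_concept_alt]
  rw [pvB_foldl_spec key.toList val.toList stmt.toList [] []]
  rw [pvF_eq_pvA]
  congr 1
  simp only [pvSplitOn_single, pvFoldl_append_map, List.nil_append, List.map_cons]
  simp only [pvA, pvLine, pvRepl, List.nil_append]
  rfl
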